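-- pv_equiv track=rewrite | github.com/JasonNSN/LPPPTDS | vlpr.py | decode_plate
-- ===== SOURCE A (Python) =====
-- def decode_plate(codes):
--     pre = 0
--     res_codes = []
--     for i in range(len(codes)):
--         if codes[i] != 0 and codes[i] != pre:
--             res_codes.append(codes[i])
--         pre = codes[i]
--     return res_codes
-- ===== SOURCE B (Python) =====
-- def decode_plate(codes):
--     # Scan run-by-run: take the first element of each maximal run of equal
--     # values, skip zero runs; no running 'pre' state.
--     res = []
--     i = 0
--     while i < len(codes):
--         k = codes[i]
--         if k != 0:
--             res.append(k)
--         while i < len(codes) and codes[i] == k: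
--             i += 1
--     return res
-- ===== Notes on version B (the rewrite author's own statement) =====
-- stated objective: alternative
-- what changed: B scans maximal runs of equal values (inner run-skipping loop) and emits each nonzero run head, instead of A's single pass with a 'previous element' accumulator.
import Mathlib
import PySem

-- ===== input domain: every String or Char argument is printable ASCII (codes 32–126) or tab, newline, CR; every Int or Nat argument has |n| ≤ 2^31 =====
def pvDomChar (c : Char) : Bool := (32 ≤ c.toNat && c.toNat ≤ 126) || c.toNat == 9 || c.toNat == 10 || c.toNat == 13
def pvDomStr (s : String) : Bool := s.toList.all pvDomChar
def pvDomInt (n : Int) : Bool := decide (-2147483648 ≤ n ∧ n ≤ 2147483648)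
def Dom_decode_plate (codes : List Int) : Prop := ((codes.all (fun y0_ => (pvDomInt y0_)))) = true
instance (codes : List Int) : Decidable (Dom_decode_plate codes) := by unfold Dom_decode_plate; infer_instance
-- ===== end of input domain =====

-- B replaces A's single pass with a 'previous element' register by a run-by-run scan
-- (collapse each maximal run to its head, drop zeros); alternative decomposition, same cost.


-- ===== PORT A =====
-- pre = 0; res = []; for i in range(len(codes)): if codes[i] != 0 and codes[i] != pre: append; pre = codes[i]
def decode_plate (codes : List Int) : List Int :=
  ((PySem.List.pyRange 0 (codes.length) 1).foldl
    (fun (st : Int × List Int) i =>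
      (PySem.List.pyGetD codes i 0,
        if PySem.List.pyGetD codes i 0 ≠ 0 ∧ PySem.List.pyGetD codes i 0 ≠ st.1 then
          st.2 ++ [PySem.List.pyGetD codes i 0]
        else st.2))
    ((0 : Int), ([] : List Int))).2

-- ===== PORT B =====
-- collapse each maximal run of equal values to its head (B's inner run-skipping loop = dropWhile)
def pvCollapse (xs : List Int) : List Int :=
  match xs with
  | [] => []
  | x :: rest => x :: pvCollapse (rest.dropWhile (· = x))
termination_by xs.length
decreasing_by
  simp only [List.length_cons]
  exact Nat.lt_succ_of_le (List.length_dropWhile_le _ _)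

def decode_plate_alt (codes : List Int) : List Int :=
  (pvCollapse codes).filter (fun c => c ≠ 0)

-- ===== PRECONDITION & SPEC =====
def Spec_decode_plate (codes : List Int) (out : List Int) : Prop := out = decode_plate_alt codes
instance (codes : List Int) (out : List Int) : Decidable (Spec_decode_plate codes out) := by unfold Spec_decode_plate; infer_instance

-- ===== CLAIM (what is proved, stated in full; the proofs are below) =====
def Claim_equal_decode_plate : Prop := ∀ (codes : List Int), Dom_decode_plate codes → Spec_decode_plate codes (decode_plate codes)

-- ===== LEMMAS AND PROOFS =====

-- the output of A's loop body, threaded by the previous element ('pre')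
def pvLoopOut (pre : Int) : List Int → List Int
  | [] => []
  | c :: cs => (if c ≠ 0 ∧ c ≠ pre then [c] else []) ++ pvLoopOut c cs

theorem pvFoldl_eq_loopOut (cs : List Int) : ∀ (pre : Int) (acc : List Int),
    (cs.foldl (fun (st : Int × List Int) c =>
        (c, if c ≠ 0 ∧ c ≠ st.1 then st.2 ++ [c] else st.2)) (pre, acc)).2
      = acc ++ pvLoopOut pre cs := by
  induction cs with
  | nil => intro pre acc; simp [pvLoopOut]
  | cons c cs ih =>
    intro pre acc
    simp only [List.foldl_cons, pvLoopOut]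
    by_cases h : c ≠ 0 ∧ c ≠ pre <;> simp [h, ih]

theorem pvLoopOut_eq (n : Nat) : ∀ (cs : List Int), cs.length ≤ n → ∀ (pre : Int),
    pvLoopOut pre cs = (pvCollapse (cs.dropWhile (· = pre))).filter (fun c => c ≠ 0) := by
  induction n with
  | zero =>
    intro cs h pre
    have : cs = [] := List.eq_nil_of_length_eq_zero (Nat.le_zero.mp h)
    subst this; simp [pvLoopOut, pvCollapse]
  | succ m ih =>
    intro cs h pre
    match cs with
    | [] => simp [pvLoopOut, pvCollapse]
    | c :: cs' =>
      have hlen : cs'.length ≤ m := by simpa using Nat.le_of_succ_le_succ h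
      by_cases hcp : c = pre
      · subst hcp
        have h1 : pvLoopOut c (c :: cs') = pvLoopOut c cs' := by simp [pvLoopOut]
        rw [h1, List.dropWhile_cons_of_pos (by simp), ih cs' hlen c]
      · rw [List.dropWhile_cons_of_neg (by simpa using hcp)]
        rw [pvCollapse]
        simp only [pvLoopOut, List.filter_cons]
        rw [ih cs' hlen c]
        by_cases hc0 : c = 0 <;> simp [hc0, hcp]

theorem pvCollapse_dropZeros (codes : List Int) :
    (pvCollapse (codes.dropWhile (· = 0))).filter (fun c => c ≠ 0)
      = (pvCollapse codes).filter (fun c => c ≠ 0) := by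
  match codes with
  | [] => rfl
  | c :: cs =>
    by_cases hc : c = 0
    · subst hc
      rw [List.dropWhile_cons_of_pos (by simp), pvCollapse]
      simp
    · rw [List.dropWhile_cons_of_neg (by simpa using hc)]

-- ===== VERDICT (by name: the statement is the Claim_ definition above) =====
theorem decode_plate_spec : Claim_equal_decode_plate := by
  intro codes _
  unfold Spec_decode_plate decode_plate decode_plate_alt
  rw [PySem.List.foldl_pyRange_zero_pyGetD' codes 0
      (fun (st : Int × List Int) c => (c, if c ≠ 0 ∧ c ≠ st.1 then st.2 ++ [c] else st.2))
      ((0 : Int), ([] : List Int))]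
  rw [pvFoldl_eq_loopOut, pvLoopOut_eq codes.length codes (le_refl _) 0]
  simpa using pvCollapse_dropZeros codes
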